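-- pv_equiv track=rewrite | github.com/colmeta/callflexai | mega_agent_anthropic_facebook.py | classify_injury_type
-- ===== SOURCE A (Python) =====
-- def classify_injury_type(text: str) -> str:
--     """Classifies injury type."""
--     text = text.lower()
--
--     if any(word in text for word in ['car accident', 'rear end', 'auto accident']):
--         return 'Car Accident'
--     elif 'motorcycle' in text:
--         return 'Motorcycle Accident'
--     elif any(word in text for word in ['slip and fall', 'premises']):
--         return 'Slip and Fall'
--     elif any(word in text for word in ['work injury', 'workers comp']):
--         return 'Workplace Injury'
--     elif 'truck' in text:
--         return 'Truck Accident'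
--     elif 'medical malpractice' in text:
--         return 'Medical Malpractice'
--     else:
--         return 'Personal Injury'
-- ===== SOURCE B (Python) =====
-- KEYWORDS = [
--     ("car accident", 0), ("rear end", 0), ("auto accident", 0),
--     ("motorcycle", 1),
--     ("slip and fall", 2), ("premises", 2),
--     ("work injury", 3), ("workers comp", 3),
--     ("truck", 4),
--     ("medical malpractice", 5),
-- ]
--
-- LABELS = ["Car Accident", "Motorcycle Accident", "Slip and Fall",
--           "Workplace Injury", "Truck Accident", "Medical Malpractice",
--           "Personal Injury"]
--
--
-- def classify_injury_type(text: str) -> str: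
--     """Classifies injury type by a single left-to-right sweep over the text:
--     at each position, any keyword starting there lowers the best (smallest)
--     matched priority; the label of the best priority wins."""
--     t = text.lower()
--     best = len(LABELS) - 1
--     for i in range(len(t)):
--         for kw, pri in KEYWORDS:
--             if pri < best and t.startswith(kw, i):
--                 best = pri
--     return LABELS[best]
-- ===== Notes on version B (the rewrite author's own statement) =====
-- stated objective: alternative
-- what changed: Instead of A's priority-ordered if/elif cascade of whole-string substring tests, B makes one left-to-right sweep over the text positions, checking which keywords start at each position and keeping the smallest matched priority, then indexes a label table with it.
import Mathlib
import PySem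

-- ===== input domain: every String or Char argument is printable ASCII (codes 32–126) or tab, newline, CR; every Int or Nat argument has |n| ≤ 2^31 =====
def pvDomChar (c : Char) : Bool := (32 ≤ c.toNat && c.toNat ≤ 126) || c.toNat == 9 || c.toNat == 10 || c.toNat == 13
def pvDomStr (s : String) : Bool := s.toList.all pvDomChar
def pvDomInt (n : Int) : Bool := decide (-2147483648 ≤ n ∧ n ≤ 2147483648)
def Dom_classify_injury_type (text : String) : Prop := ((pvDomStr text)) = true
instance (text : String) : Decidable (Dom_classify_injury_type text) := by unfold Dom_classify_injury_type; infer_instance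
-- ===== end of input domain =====

-- B replaces A's priority-ordered if/elif cascade of substring tests by a single left-to-right
-- sweep over the text positions that keeps the smallest matched priority (objective: alternative).

-- ===== PORT A =====
def classify_injury_type (text : String) : String :=
  let t := PySem.Str.lower text
  if ["car accident", "rear end", "auto accident"].any (fun w => PySem.Str.isIn w t) then
    "Car Accident"
  else if PySem.Str.isIn "motorcycle" t then
    "Motorcycle Accident"
  else if ["slip and fall", "premises"].any (fun w => PySem.Str.isIn w t) then
    "Slip and Fall"
  else if ["work injury", "workers comp"].any (fun w => PySem.Str.isIn w t) then
    "Workplace Injury"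
  else if PySem.Str.isIn "truck" t then
    "Truck Accident"
  else if PySem.Str.isIn "medical malpractice" t then
    "Medical Malpractice"
  else
    "Personal Injury"

-- ===== PORT B =====
def pvKeywords : List (String × Nat) :=
  [ ("car accident", 0), ("rear end", 0), ("auto accident", 0),
    ("motorcycle", 1),
    ("slip and fall", 2), ("premises", 2),
    ("work injury", 3), ("workers comp", 3),
    ("truck", 4),
    ("medical malpractice", 5) ]

def pvLabels : List String :=
  ["Car Accident", "Motorcycle Accident", "Slip and Fall",
   "Workplace Injury", "Truck Accident", "Medical Malpractice",
   "Personal Injury"]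

-- exact port of Python's t.startswith(kw, i) for 0 ≤ i (the only indices B uses)
def pvStartsAt (t kw : String) (i : Nat) : Bool := kw.toList.isPrefixOf (t.toList.drop i)

def classify_injury_type_alt (text : String) : String :=
  let t := PySem.Str.lower text
  let best := (List.range t.toList.length).foldl
    (fun best i => pvKeywords.foldl
      (fun best kp => if kp.2 < best && pvStartsAt t kp.1 i then kp.2 else best) best) (pvLabels.length - 1)
  pvLabels.getD best "Personal Injury"

-- ===== PRECONDITION & SPEC =====
def Spec_classify_injury_type (text : String) (out : String) : Prop := out = classify_injury_type_alt text
instance (text : String) (out : String) : Decidable (Spec_classify_injury_type text out) := by unfold Spec_classify_injury_type; infer_instance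

-- ===== CLAIM =====
def Claim_equal_classify_injury_type : Prop := ∀ (text : String), Dom_classify_injury_type text → Spec_classify_injury_type text (classify_injury_type text)

-- ===== LEMMAS AND PROOFS =====

-- the fold step of B, abstractly
def pvMStep (b : Nat) (x : Nat × Bool) : Nat := if x.1 < b && x.2 then x.1 else b

-- matched priorities of a pair list
def pvMatched (L : List (Nat × Bool)) : List Nat := (L.filter (·.2)).map (·.1)

lemma foldl_mstep_eq (L : List (Nat × Bool)) (b : Nat) :
    L.foldl pvMStep b = (pvMatched L).foldl min b := by
  induction L generalizing b with
  | nil => rfl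
  | cons x xs ih =>
      obtain ⟨p, c⟩ := x
      cases c with
      | false => simp [pvMStep, pvMatched, ih]
      | true =>
          rw [List.foldl_cons, ih]
          have hstep : pvMStep b (p, true) = min b p := by
            simp only [pvMStep, Bool.and_true, decide_eq_true_eq]
            split <;> omega
          have hmat : pvMatched ((p, true) :: xs) = p :: pvMatched xs := by simp [pvMatched]
          rw [hstep, hmat, List.foldl_cons]

lemma foldl_min_le_init (l : List Nat) (b : Nat) : l.foldl min b ≤ b := by
  induction l generalizing b with
  | nil => simp
  | cons x xs ih =>
      rw [List.foldl_cons]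
      exact le_trans (ih _) (Nat.min_le_left _ _)

lemma foldl_min_le_mem (l : List Nat) : ∀ (b a : Nat), a ∈ l → l.foldl min b ≤ a := by
  induction l with
  | nil => intro b a h; cases h
  | cons x xs ih =>
      intro b a h
      rw [List.foldl_cons]
      rcases List.mem_cons.mp h with rfl | h'
      · exact le_trans (foldl_min_le_init _ _) (Nat.min_le_right _ _)
      · exact ih _ _ h'

lemma foldl_min_eq_or_mem (l : List Nat) (b : Nat) : l.foldl min b = b ∨ l.foldl min b ∈ l := by
  induction l generalizing b with
  | nil => left; rfl
  | cons x xs ih =>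
      rcases ih (min b x) with h | h
      · rw [List.foldl_cons, h]
        rcases Nat.le_total b x with hb | hb
        · left; exact Nat.min_eq_left hb
        · right; rw [Nat.min_eq_right hb]; exact List.mem_cons_self ..
      · right; rw [List.foldl_cons]; exact List.mem_cons_of_mem _ h

-- the flattened pair list B's double fold traverses
def pvBigPairs (t : String) : List (Nat × Bool) :=
  (List.range t.toList.length).flatMap (fun i => pvKeywords.map (fun kp => (kp.2, pvStartsAt t kp.1 i)))

lemma inner_fold_eq (t : String) (i : Nat) (K : List (String × Nat)) (b : Nat) :
    K.foldl (fun best kp => if kp.2 < best && pvStartsAt t kp.1 i then kp.2 else best) b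
    = (K.map (fun kp => (kp.2, pvStartsAt t kp.1 i))).foldl pvMStep b := by
  induction K generalizing b with
  | nil => rfl
  | cons k ks ihk => rw [List.foldl_cons, List.map_cons, List.foldl_cons, ihk]; rfl

lemma double_fold_eq (t : String) (b : Nat) :
    (List.range t.toList.length).foldl
      (fun best i => pvKeywords.foldl
        (fun best kp => if kp.2 < best && pvStartsAt t kp.1 i then kp.2 else best) best) b
    = (pvBigPairs t).foldl pvMStep b := by
  unfold pvBigPairs
  generalize List.range t.toList.length = is
  induction is generalizing b with
  | nil => rfl
  | cons i is ih =>
      rw [List.foldl_cons, List.flatMap_cons, List.foldl_append, ← ih, inner_fold_eq]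

lemma mem_matched_bigPairs (t : String) (p : Nat) :
    p ∈ pvMatched (pvBigPairs t) ↔
      ∃ kw, (kw, p) ∈ pvKeywords ∧ ∃ i < t.toList.length, pvStartsAt t kw i = true := by
  unfold pvMatched pvBigPairs
  simp only [List.mem_map, List.mem_filter, List.mem_flatMap, List.mem_range]
  constructor
  · rintro ⟨⟨a, c⟩, ⟨⟨i, hi, ⟨kp, hkp, heq⟩⟩, hc⟩, rfl⟩
    cases heq
    exact ⟨kp.1, by simpa using hkp, i, hi, hc⟩
  · rintro ⟨kw, hkw, i, hi, hs⟩
    exact ⟨(p, true), ⟨⟨i, hi, ⟨(kw, p), hkw, by simp [hs]⟩⟩, rfl⟩, rfl⟩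

lemma occ_iff (t kw : String) (hkw : kw.toList ≠ []) :
    (∃ i < t.toList.length, pvStartsAt t kw i = true) ↔ PySem.Str.isIn kw t = true := by
  rw [PySem.Str.isIn_eq, ← PySem.Chars.exists_prefix_drop_iff_isIn]
  constructor
  · rintro ⟨i, _, hs⟩
    exact ⟨i, List.isPrefixOf_iff_prefix.mp hs⟩
  · rintro ⟨j, hj⟩
    refine ⟨j, ?_, List.isPrefixOf_iff_prefix.mpr hj⟩
    by_contra h
    push_neg at h
    rw [List.drop_eq_nil_of_le h] at hj
    exact hkw (List.prefix_nil.mp hj)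

-- group conditions, exactly as A tests them
def pvCond (t : String) : Nat → Bool
  | 0 => ["car accident", "rear end", "auto accident"].any (fun w => PySem.Str.isIn w t)
  | 1 => PySem.Str.isIn "motorcycle" t
  | 2 => ["slip and fall", "premises"].any (fun w => PySem.Str.isIn w t)
  | 3 => ["work injury", "workers comp"].any (fun w => PySem.Str.isIn w t)
  | 4 => PySem.Str.isIn "truck" t
  | 5 => PySem.Str.isIn "medical malpractice" t
  | _ => false

lemma mem_matched_iff_cond (t : String) (p : Nat) :
    p ∈ pvMatched (pvBigPairs t) ↔ pvCond t p = true := by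
  rw [mem_matched_bigPairs]
  constructor
  · rintro ⟨kw, hkw, hocc⟩
    fin_cases hkw <;>
      simp only [pvCond, List.any_cons, List.any_nil, Bool.or_false, Bool.or_eq_true] <;>
      first
        | exact Or.inl ((occ_iff t _ (by decide)).mp hocc)
        | exact Or.inr (Or.inl ((occ_iff t _ (by decide)).mp hocc))
        | exact Or.inr (Or.inr ((occ_iff t _ (by decide)).mp hocc))
        | exact Or.inr ((occ_iff t _ (by decide)).mp hocc)
        | exact (occ_iff t _ (by decide)).mp hocc
  · intro hc
    match p, hc with
    | 0, hc =>
        simp only [pvCond, List.any_cons, List.any_nil, Bool.or_false, Bool.or_eq_true] at hc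
        rcases hc with h | h | h
        · exact ⟨"car accident", by simp [pvKeywords], (occ_iff t _ (by decide)).mpr h⟩
        · exact ⟨"rear end", by simp [pvKeywords], (occ_iff t _ (by decide)).mpr h⟩
        · exact ⟨"auto accident", by simp [pvKeywords], (occ_iff t _ (by decide)).mpr h⟩
    | 1, hc => exact ⟨"motorcycle", by simp [pvKeywords], (occ_iff t _ (by decide)).mpr hc⟩
    | 2, hc =>
        simp only [pvCond, List.any_cons, List.any_nil, Bool.or_false, Bool.or_eq_true] at hc
        rcases hc with h | h
        · exact ⟨"slip and fall", by simp [pvKeywords], (occ_iff t _ (by decide)).mpr h⟩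
        · exact ⟨"premises", by simp [pvKeywords], (occ_iff t _ (by decide)).mpr h⟩
    | 3, hc =>
        simp only [pvCond, List.any_cons, List.any_nil, Bool.or_false, Bool.or_eq_true] at hc
        rcases hc with h | h
        · exact ⟨"work injury", by simp [pvKeywords], (occ_iff t _ (by decide)).mpr h⟩
        · exact ⟨"workers comp", by simp [pvKeywords], (occ_iff t _ (by decide)).mpr h⟩
    | 4, hc => exact ⟨"truck", by simp [pvKeywords], (occ_iff t _ (by decide)).mpr hc⟩
    | 5, hc => exact ⟨"medical malpractice", by simp [pvKeywords], (occ_iff t _ (by decide)).mpr hc⟩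

-- the accumulated best priority is the first p with pvCond t p
lemma best_characterization (t : String) :
    (pvMatched (pvBigPairs t)).foldl min 6 =
      if pvCond t 0 then 0 else if pvCond t 1 then 1 else if pvCond t 2 then 2
      else if pvCond t 3 then 3 else if pvCond t 4 then 4 else if pvCond t 5 then 5 else 6 := by
  set M := pvMatched (pvBigPairs t) with hM
  have hle : ∀ p, pvCond t p = true → M.foldl min 6 ≤ p := fun p hp =>
    foldl_min_le_mem _ _ _ ((mem_matched_iff_cond t p).mpr hp)
  have hval : M.foldl min 6 = 6 ∨ pvCond t (M.foldl min 6) = true := by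
    rcases foldl_min_eq_or_mem M 6 with h | h
    · exact Or.inl h
    · exact Or.inr ((mem_matched_iff_cond t _).mp h)
  have hb6 : M.foldl min 6 ≤ 6 := foldl_min_le_init _ _
  split_ifs with h0 h1 h2 h3 h4 h5
  · have := hle 0 h0; omega
  · rcases hval with h | h
    · exfalso; have := hle 1 h1; omega
    · have hA : M.foldl min 6 ≤ 1 := hle 1 h1
      generalize hb : M.foldl min 6 = b at h hA ⊢
      interval_cases b <;> first | rfl | exact absurd h h0
  · rcases hval with h | h
    · exfalso; have := hle 2 h2; omega
    · have hA : M.foldl min 6 ≤ 2 := hle 2 h2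
      generalize hb : M.foldl min 6 = b at h hA ⊢
      interval_cases b <;> first | rfl | exact absurd h h0 | exact absurd h h1
  · rcases hval with h | h
    · exfalso; have := hle 3 h3; omega
    · have hA : M.foldl min 6 ≤ 3 := hle 3 h3
      generalize hb : M.foldl min 6 = b at h hA ⊢
      interval_cases b <;>
        first | rfl | exact absurd h h0 | exact absurd h h1 | exact absurd h h2
  · rcases hval with h | h
    · exfalso; have := hle 4 h4; omega
    · have hA : M.foldl min 6 ≤ 4 := hle 4 h4
      generalize hb : M.foldl min 6 = b at h hA ⊢
      interval_cases b <;>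
        first
          | rfl
          | exact absurd h h0
          | exact absurd h h1
          | exact absurd h h2
          | exact absurd h h3
  · rcases hval with h | h
    · exfalso; have := hle 5 h5; omega
    · have hA : M.foldl min 6 ≤ 5 := hle 5 h5
      generalize hb : M.foldl min 6 = b at h hA ⊢
      interval_cases b <;>
        first
          | rfl
          | exact absurd h h0
          | exact absurd h h1
          | exact absurd h h2
          | exact absurd h h3
          | exact absurd h h4
  · rcases hval with h | h
    · exact h
    · generalize hb : M.foldl min 6 = b at h hb6 ⊢
      interval_cases b <;>
        first
          | rfl
          | exact absurd h h0
          | exact absurd h h1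
          | exact absurd h h2
          | exact absurd h h3
          | exact absurd h h4
          | exact absurd h h5

-- ===== VERDICT =====
theorem classify_injury_type_spec : Claim_equal_classify_injury_type := by
  intro text _
  unfold Spec_classify_injury_type
  simp only [classify_injury_type, classify_injury_type_alt]
  rw [show pvLabels.length - 1 = 6 from rfl, double_fold_eq, foldl_mstep_eq,
    best_characterization]
  set t := PySem.Str.lower text with ht
  have e0 : (["car accident", "rear end", "auto accident"].any (fun w => PySem.Str.isIn w t)) = pvCond t 0 := rfl
  have e1 : PySem.Str.isIn "motorcycle" t = pvCond t 1 := rfl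
  have e2 : (["slip and fall", "premises"].any (fun w => PySem.Str.isIn w t)) = pvCond t 2 := rfl
  have e3 : (["work injury", "workers comp"].any (fun w => PySem.Str.isIn w t)) = pvCond t 3 := rfl
  have e4 : PySem.Str.isIn "truck" t = pvCond t 4 := rfl
  have e5 : PySem.Str.isIn "medical malpractice" t = pvCond t 5 := rfl
  rw [e0, e1, e2, e3, e4, e5]
  by_cases h0 : pvCond t 0 = true <;> by_cases h1 : pvCond t 1 = true <;>
    by_cases h2 : pvCond t 2 = true <;> by_cases h3 : pvCond t 3 = true <;>
    by_cases h4 : pvCond t 4 = true <;> by_cases h5 : pvCond t 5 = true <;>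
    simp [h0, h1, h2, h3, h4, h5, pvLabels, List.getD]
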